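-- pv_equiv track=rewrite | github.com/IvanKalug-QA/codewars | Square_Pi_s.py | square_pi
-- ===== SOURCE A (Python) =====
-- def square_pi(digits):
--     if not digits:
--         return 0
--     pi_digits = "31415926535897932384626433832795028841971693993751058209749445923078164062862089986280348253421170679"
--
--     first_digits = pi_digits[:digits]
--
--     sum_squares = 0
--     for digit in first_digits:
--         num = int(digit)
--         sum_squares += num * num
--
--     result = 1
--     while result * result < sum_squares:
--         result += 1
--
--     return result
-- ===== SOURCE B (Python) =====
-- def square_pi(digits):
--     if not digits:
--         return 0
--     pi_digits = "31415926535897932384626433832795028841971693993751058209749445923078164062862089986280348253421170679"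
--     sum_squares = sum(int(d) * int(d) for d in pi_digits[:digits])
--     # binary search for the smallest r with r*r >= sum_squares
--     lo, hi = 0, sum_squares
--     while lo < hi:
--         mid = (lo + hi) // 2
--         if mid * mid < sum_squares:
--             lo = mid + 1
--         else:
--             hi = mid
--     return lo
-- ===== Notes on version B (the rewrite author's own statement) =====
-- stated objective: alternative
-- what changed: The linear upward scan 'while result*result < sum_squares: result += 1' is replaced by a binary search on [0, sum_squares] for the smallest integer whose square reaches the sum; the accumulator loop for the digit-square sum becomes a sum over a generator.
-- outside the precondition, e.g. on square_pi(-101): A returns 1, B returns 0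
import Mathlib
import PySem

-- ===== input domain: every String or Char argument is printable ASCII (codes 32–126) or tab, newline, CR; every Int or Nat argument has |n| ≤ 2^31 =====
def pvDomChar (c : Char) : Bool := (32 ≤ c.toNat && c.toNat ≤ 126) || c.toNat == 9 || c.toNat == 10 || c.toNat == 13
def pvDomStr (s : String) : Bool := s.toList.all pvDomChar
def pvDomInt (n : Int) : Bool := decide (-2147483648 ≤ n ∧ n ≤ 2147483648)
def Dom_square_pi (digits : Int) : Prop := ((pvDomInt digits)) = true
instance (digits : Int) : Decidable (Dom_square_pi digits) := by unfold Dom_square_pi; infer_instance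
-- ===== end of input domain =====

-- B replaces A's linear upward scan for the ceiling square root by a binary search (alternative decomposition; same sum of squared pi digits).

-- ===== PORT A =====
def pvPiDigits : String := "31415926535897932384626433832795028841971693993751058209749445923078164062862089986280348253421170679"

-- A's 'while result * result < sum_squares: result += 1' (the 1 ≤ result argument only justifies termination)
def pvALoop (s : Int) (result : Int) (h : 1 ≤ result) : Int :=
  if hlt : result * result < s then pvALoop s (result + 1) (by omega) else result
termination_by (s - result).toNat
decreasing_by
  have h1 : result ≤ result * result := le_mul_of_one_le_left (by omega) h
  omega

def square_pi (digits : Int) : Int :=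
  if digits = 0 then 0
  else
    let first_digits := PySem.Str.slice pvPiDigits none (some digits)
    let sum_squares := first_digits.toList.foldl
      (fun acc digit =>
        let num := (PySem.Int.ofChars? [digit]).getD 0
        acc + num * num) 0
    pvALoop sum_squares 1 (by norm_num)

-- ===== PORT B =====
-- B's 'while lo < hi: …' binary search (the 0 ≤ lo argument only justifies termination)
def pvBLoop (s : Int) (lo hi : Int) (hlo : 0 ≤ lo) : Int :=
  if h : lo < hi then
    let mid := PySem.Int.floordiv (lo + hi) 2
    have hb := PySem.Int.floordiv_two_mid_bounds (le_of_lt h) (lo := lo) (hi := hi)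
    have hmlt : mid < hi := (PySem.Int.floordiv_lt_iff_lt_mul (by norm_num)).mpr (by omega)
    if hm : mid * mid < s then pvBLoop s (mid + 1) hi (by omega)
    else pvBLoop s lo mid hlo
  else lo
termination_by (hi - lo).toNat
decreasing_by
  · omega
  · omega

def square_pi_alt (digits : Int) : Int :=
  if digits = 0 then 0
  else
    let sum_squares := ((PySem.Str.slice pvPiDigits none (some digits)).toList.map
      (fun d =>
        ((PySem.Int.ofChars? [d]).getD 0) * ((PySem.Int.ofChars? [d]).getD 0))).sum
    pvBLoop sum_squares 0 sum_squares (le_refl 0)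

-- ===== PRECONDITION & SPEC =====
-- Pre_ excludes negative digit counts, outside the function's natural domain (a count of pi digits);
-- there Python's negative-slice wraparound makes A's value an artefact of its loop's floor of 1.
def Pre_square_pi (digits : Int) : Prop := 0 ≤ digits
instance (digits : Int) : Decidable (Pre_square_pi digits) := by unfold Pre_square_pi; infer_instance
def pvWitness_square_pi : Int := (7)

def Spec_square_pi (digits : Int) (out : Int) : Prop := out = square_pi_alt digits
instance (digits : Int) (out : Int) : Decidable (Spec_square_pi digits out) := by unfold Spec_square_pi; infer_instance

-- ===== CLAIM (what is proved, stated in full; the proofs are below) =====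
def Claim_equal_square_pi : Prop := ∀ (digits : Int), Dom_square_pi digits → Pre_square_pi digits → Spec_square_pi digits (square_pi digits)

-- ===== LEMMAS AND PROOFS =====

-- A's loop returns the least r ≥ 1 with s ≤ r*r, provided result is still below that point.
theorem pvALoop_spec (s result : Int) (h : 1 ≤ result) :
    (result - 1) * (result - 1) < s →
    s ≤ pvALoop s result h * pvALoop s result h ∧
    (pvALoop s result h - 1) * (pvALoop s result h - 1) < s ∧ 1 ≤ pvALoop s result h := by
  fun_induction pvALoop s result h with
  | case1 result h hlt ih =>
      intro _
      exact ih (by simpa using hlt)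
  | case2 result h hlt =>
      intro hpre
      exact ⟨not_lt.mp hlt, hpre, h⟩

-- B's binary search keeps the invariant (lo = 0 ∨ (lo-1)² < s) ∧ s ≤ hi².
theorem pvBLoop_spec (s lo hi : Int) (hlo : 0 ≤ lo) :
    lo ≤ hi → (lo = 0 ∨ (lo - 1) * (lo - 1) < s) → s ≤ hi * hi →
    s ≤ pvBLoop s lo hi hlo * pvBLoop s lo hi hlo ∧
    (pvBLoop s lo hi hlo = 0 ∨ (pvBLoop s lo hi hlo - 1) * (pvBLoop s lo hi hlo - 1) < s) ∧
    0 ≤ pvBLoop s lo hi hlo := by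
  fun_induction pvBLoop s lo hi hlo with
  | case1 lo hi hlo h mid hb hmlt hm ih =>
      intro _ _ h2
      exact ih (by omega) (Or.inr (by simpa using hm)) h2
  | case2 lo hi hlo h mid hb hmlt hm ih =>
      intro _ h1 _
      exact ih (by omega) h1 (not_lt.mp hm)
  | case3 lo hi hlo h =>
      intro hle h1 h2
      have : lo = hi := by omega
      subst this
      exact ⟨h2, h1, hlo⟩

theorem pvCeil_unique (s a b : Int)
    (ha : s ≤ a * a ∧ (a - 1) * (a - 1) < s ∧ 1 ≤ a)
    (hb : s ≤ b * b ∧ (b - 1) * (b - 1) < s ∧ 1 ≤ b) : a = b := by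
  obtain ⟨ha1, ha2, ha3⟩ := ha
  obtain ⟨hb1, hb2, hb3⟩ := hb
  rcases lt_trichotomy a b with h | h | h
  · have hab : a * a ≤ (b - 1) * (b - 1) := by nlinarith
    linarith
  · exact h
  · have hba : b * b ≤ (a - 1) * (a - 1) := by nlinarith
    linarith

-- foldl-with-accumulator equals init + sum of the mapped squares
theorem pvFoldl_eq_sum (f : Char → Int) (l : List Char) (init : Int) :
    l.foldl (fun acc d => acc + f d * f d) init = init + (l.map (fun d => f d * f d)).sum := by
  induction l generalizing init with
  | nil => simp
  | cons c t ih => simp [List.foldl_cons, ih]; ring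

theorem pvSum_sq_nonneg (f : Char → Int) (l : List Char) :
    0 ≤ (l.map (fun d => f d * f d)).sum := by
  induction l with
  | nil => simp
  | cons c t ih =>
      simp only [List.map_cons, List.sum_cons]
      exact add_nonneg (mul_self_nonneg _) ih

-- ===== VERDICT =====
theorem square_pi_spec : Claim_equal_square_pi := by
  intro digits _hdom hpre
  unfold Spec_square_pi square_pi square_pi_alt
  by_cases h0 : digits = 0
  · simp [h0]
  · simp only [h0, if_false]
    set f : Char → Int := fun d => (PySem.Int.ofChars? [d]).getD 0 with hf
    set L : List Char := (PySem.Str.slice pvPiDigits none (some digits)).toList with hL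
    have hsum :
        L.foldl (fun acc digit =>
          let num := (PySem.Int.ofChars? [digit]).getD 0
          acc + num * num) 0 = (L.map (fun d => f d * f d)).sum := by
      simpa using pvFoldl_eq_sum f L 0
    rw [hsum]
    set s : Int := (L.map (fun d => f d * f d)).sum with hs
    -- s ≥ 9: the slice is nonempty and starts with '3'
    have hdig1 : (1 : Int) ≤ digits := by
      have := hpre; unfold Pre_square_pi at this; omega
    have hLhead : L = '3' :: ('1' :: "415926535897932384626433832795028841971693993751058209749445923078164062862089986280348253421170679".toList).take (digits.toNat - 1) := by
      rw [hL, PySem.Str.toList_slice, PySem.Chars.slice_eq_listSlice, PySem.List.slice_to _ (by omega : (0:Int) ≤ digits)]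
      have : pvPiDigits.toList = '3' :: ('1' :: "415926535897932384626433832795028841971693993751058209749445923078164062862089986280348253421170679".toList) := by decide
      rw [this, List.take_cons (by omega)]
    have hs9 : 9 ≤ s := by
      rw [hs, hLhead]
      simp only [List.map_cons, List.sum_cons]
      have hf3 : f '3' = 3 := by decide
      have := pvSum_sq_nonneg f (('1' :: "415926535897932384626433832795028841971693993751058209749445923078164062862089986280348253421170679".toList).take (digits.toNat - 1))
      rw [hf3]
      omega
    have hA := pvALoop_spec s 1 (by norm_num) (by norm_num; omega)
    have hB := pvBLoop_spec s 0 s (le_refl 0) (by omega) (Or.inl rfl) (by nlinarith)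
    have hBne : pvBLoop s 0 s (le_refl 0) ≠ 0 := by
      intro hz
      have := hB.1
      rw [hz] at this
      simp at this
      omega
    exact pvCeil_unique s _ _ ⟨hA.1, hA.2.1, hA.2.2⟩
      ⟨hB.1, by rcases hB.2.1 with h | h; exact absurd h hBne; exact h, by
        rcases hB.2.1 with h | h
        · exact absurd h hBne
        · have := hB.2.2; omega⟩
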